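-- pv_equiv track=rewrite | github.com/django/django | venv/Lib/site-packages/docutils/utils/__init__.py | escape2null
-- ===== SOURCE A (Python) =====
-- def escape2null(text: str) -> str:
--     """Return a string with escape-backslashes converted to nulls."""
--     parts = []
--     start = 0
--     while True:
--         bs_index = text.find('\\', start)
--         if bs_index == -1:
--             parts.append(text[start:])
--             return ''.join(parts)
--         parts.extend((text[start:bs_index],
--                       '\x00' + text[bs_index + 1:bs_index + 2]))
--         start = bs_index + 2  # skip character after escape
-- ===== SOURCE B (Python) =====
-- def escape2null(text: str) -> str:
--     """Return a string with escape-backslashes converted to nulls."""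
--     out = []
--     escaped = False
--     for ch in text:
--         if escaped:
--             out.append(ch)
--             escaped = False
--         elif ch == '\\':
--             out.append('\x00')
--             escaped = True
--         else:
--             out.append(ch)
--     return ''.join(out)
-- ===== Notes on version B (the rewrite author's own statement) =====
-- stated objective: simpler
-- what changed: Replaces A's find-next-backslash-and-slice loop (repeated str.find plus slicing into a parts list) with a single per-character scan maintaining an escape flag.
import Mathlib
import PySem

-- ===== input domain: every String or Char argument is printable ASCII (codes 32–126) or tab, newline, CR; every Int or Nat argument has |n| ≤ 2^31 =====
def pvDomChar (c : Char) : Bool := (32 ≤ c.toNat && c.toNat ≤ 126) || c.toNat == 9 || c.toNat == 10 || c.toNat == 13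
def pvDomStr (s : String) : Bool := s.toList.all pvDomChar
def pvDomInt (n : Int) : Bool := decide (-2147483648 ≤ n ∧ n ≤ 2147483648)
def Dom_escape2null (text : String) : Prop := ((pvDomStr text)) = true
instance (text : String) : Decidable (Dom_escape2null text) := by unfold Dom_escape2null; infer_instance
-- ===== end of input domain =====

-- B replaces A's find-next-backslash-and-slice loop with a single per-character scan
-- keeping an 'escaped' flag; objective: simpler (same O(n) cost).

-- ===== PORT A =====
-- text.find('\\', start) past the end of the string is -1 (used by the loop's termination).
theorem pvFindFrom_past_end (s : List Char) (k : Nat) (h : s.length < k) :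
    PySem.Chars.findFrom s ['\\'] (k : Int) none = -1 := by
  have hk : ¬((k : Int) < 0) := by omega
  simp [PySem.Chars.findFrom, hk]
  omega

-- the while-loop of A: state = (start, parts); strings handled as their char lists;
-- bs_index = text.find('\\', start) is written out at each use (the same single computation)
def escape2nullLoop (text : List Char) (start : Nat) (parts : List (List Char)) : List Char :=
  if hbs : PySem.Chars.findFrom text ['\\'] (start : Int) none = -1 then
    (parts ++ [PySem.List.slice text (some (start : Int)) none]).flatten
  else
    escape2nullLoop text ((PySem.Chars.findFrom text ['\\'] (start : Int) none).toNat + 2)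
      (parts ++ [PySem.List.slice text (some (start : Int)) (some (PySem.Chars.findFrom text ['\\'] (start : Int) none)),
                 '\x00' :: PySem.List.slice text (some (PySem.Chars.findFrom text ['\\'] (start : Int) none + 1)) (some (PySem.Chars.findFrom text ['\\'] (start : Int) none + 2))])
termination_by text.length + 1 - start
decreasing_by
  by_cases hle : start ≤ text.length
  · have hs := PySem.Chars.findFrom_natCast_spec text ['\\'] start hle hbs
    omega
  · exact absurd (pvFindFrom_past_end text start (by omega)) hbs

def escape2null (text : String) : String :=
  String.mk (escape2nullLoop text.toList 0 [])

-- ===== PORT B =====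
def escape2null_alt (text : String) : String :=
  String.mk
    (text.toList.foldl
      (fun st ch =>
        if st.2 then (st.1 ++ [ch], false)
        else if ch = '\\' then (st.1 ++ ['\x00'], true)
        else (st.1 ++ [ch], false))
      ([], false)).1

-- ===== PRECONDITION & SPEC =====
def Spec_escape2null (text : String) (out : String) : Prop := out = escape2null_alt text
instance (text : String) (out : String) : Decidable (Spec_escape2null text out) := by unfold Spec_escape2null; infer_instance

-- ===== CLAIM (what is proved, stated in full; the proofs are below) =====
def Claim_equal_escape2null : Prop := ∀ (text : String), Dom_escape2null text → Spec_escape2null text (escape2null text)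

-- ===== LEMMAS AND PROOFS =====

-- the B state machine as a function of (escaped, remaining input)
def pvMachine : Bool → List Char → List Char
  | _, [] => []
  | true, c :: cs => c :: pvMachine false cs
  | false, c :: cs => if c = '\\' then '\x00' :: pvMachine true cs else c :: pvMachine false cs

theorem pvFoldl_machine (cs : List Char) (out : List Char) (esc : Bool) :
    (cs.foldl
      (fun st ch =>
        if st.2 then (st.1 ++ [ch], false)
        else if ch = '\\' then (st.1 ++ ['\x00'], true)
        else (st.1 ++ [ch], false))
      (out, esc)).1 = out ++ pvMachine esc cs := by
  induction cs generalizing out esc with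
  | nil => simp [pvMachine]
  | cons c cs ih =>
    cases esc with
    | true => simp [pvMachine, ih]
    | false =>
      by_cases hc : c = '\\' <;> simp [pvMachine, hc, ih]

theorem pvMachine_no_bs (cs : List Char) (h : '\\' ∉ cs) : pvMachine false cs = cs := by
  induction cs with
  | nil => rfl
  | cons c cs ih =>
    simp at h
    have hc : ¬ c = '\\' := fun hh => h.1 hh.symm
    simp [pvMachine, hc, ih h.2]

theorem pvMachine_append_no_bs (seg cs : List Char) (h : '\\' ∉ seg) :
    pvMachine false (seg ++ cs) = seg ++ pvMachine false cs := by
  induction seg with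
  | nil => rfl
  | cons c seg ih =>
    simp at h
    have hc : ¬ c = '\\' := fun hh => h.1 hh.symm
    simp [pvMachine, hc, ih h.2]

theorem pvMachine_true (cs : List Char) :
    pvMachine true cs = cs.take 1 ++ pvMachine false (cs.drop 1) := by
  cases cs <;> simp [pvMachine]

-- ['\\'] is a prefix of text.drop i iff text[i] = '\\'
theorem pvPrefix_iff (text : List Char) (i : Nat) :
    ['\\'] <+: text.drop i ↔ ∃ h : i < text.length, text[i] = '\\' := by
  constructor
  · rintro ⟨t, ht⟩
    have hd : List.drop i text = '\\' :: t := ht.symm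
    have hlen : i < text.length := by
      by_contra hcon
      rw [List.drop_eq_nil_iff.mpr (by omega)] at hd
      cases hd
    refine ⟨hlen, ?_⟩
    have h0 : text[i]? = some '\\' := by
      have h1 : (List.drop i text)[0]? = some '\\' := by rw [hd]; rfl
      rwa [List.getElem?_drop, Nat.add_zero] at h1
    rw [List.getElem?_eq_getElem hlen] at h0
    exact Option.some.inj h0
  · rintro ⟨h, hc⟩
    refine ⟨text.drop (i + 1), ?_⟩
    rw [← List.getElem_cons_drop h, hc]
    rfl

-- main invariant of A's loop
theorem pvLoop_eq (text : List Char) (start : Nat) (parts : List (List Char)) :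
    escape2nullLoop text start parts = parts.flatten ++ pvMachine false (text.drop start) := by
  induction start, parts using escape2nullLoop.induct text with
  | case1 start parts hbs =>
    rw [escape2nullLoop, dif_pos hbs]
    rw [PySem.List.slice_from_natCast]
    have hnb : '\\' ∉ text.drop start := by
      by_cases hle : start ≤ text.length
      · have := (PySem.Chars.findFrom_natCast_eq_neg_one_iff text ['\\'] start hle).mp hbs
        intro hm
        exact this ((List.singleton_infix_iff '\\' (text.drop start)).mpr hm)
      · rw [List.drop_eq_nil_iff.mpr (by omega)]
        exact List.not_mem_nil
    rw [pvMachine_no_bs _ hnb]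
    simp
  | case2 start parts hbs ih =>
    rw [escape2nullLoop, dif_neg hbs]
    rw [ih]
    have hle : start ≤ text.length := by
      by_contra hcon
      exact hbs (pvFindFrom_past_end text start (by omega))
    obtain ⟨h1, h2, h3⟩ := PySem.Chars.findFrom_natCast_spec text ['\\'] start hle hbs
    set bs := PySem.Chars.findFrom text ['\\'] (start : Int) none with hbsdef
    have hbs0 : 0 ≤ bs := le_trans (by omega) h1
    obtain ⟨hblen, hbch⟩ := (pvPrefix_iff text bs.toNat).mp h2
    have hsb : start ≤ bs.toNat := by omega
    -- unfold the two slices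
    rw [PySem.List.slice_toNat text (by omega) hbs0,
        PySem.List.slice_toNat text (by omega) (by omega : (0:Int) ≤ bs + 2)]
    have hplus1 : (bs + 1).toNat = bs.toNat + 1 := by omega
    have hplus2 : (bs + 2).toNat = bs.toNat + 2 := by omega
    rw [hplus1, hplus2]
    simp only [Int.toNat_natCast]
    -- the segment before the backslash has no backslash
    set seg := (text.drop start).take (bs.toNat - start) with hsegdef
    have hnbseg : '\\' ∉ seg := by
      intro hm
      obtain ⟨j, hj, hjv⟩ := List.getElem_of_mem hm
      have hjlt : j < bs.toNat - start := lt_of_lt_of_le hj (by simp [hsegdef])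
      have : text[start + j]'(by omega) = '\\' := by
        have hq : (List.drop start text)[j]? = some '\\' := by
          rw [← List.getElem?_take_of_lt (show j < bs.toNat - start by omega), ← hsegdef,
              List.getElem?_eq_getElem hj, hjv]
        rw [List.getElem?_drop, List.getElem?_eq_getElem (show start + j < text.length by omega)] at hq
        exact Option.some.inj hq
      exact h3 (start + j) (by omega) (by omega)
        ((pvPrefix_iff text (start + j)).mpr ⟨by omega, this⟩)
    -- split the suffix at the backslash
    have hsplit : text.drop start = seg ++ '\\' :: text.drop (bs.toNat + 1) := by
      have h4 : seg ++ (text.drop start).drop (bs.toNat - start) = text.drop start :=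
        List.take_append_drop _ _
      rw [List.drop_drop] at h4
      have h5 : start + (bs.toNat - start) = bs.toNat := by omega
      rw [h5] at h4
      rw [← h4, ← List.getElem_cons_drop hblen, hbch]
    rw [hsplit, pvMachine_append_no_bs _ _ hnbseg]
    have : pvMachine false ('\\' :: text.drop (bs.toNat + 1)) =
        '\x00' :: pvMachine true (text.drop (bs.toNat + 1)) := by
      simp [pvMachine]
    rw [this, pvMachine_true, List.drop_drop]
    simp

-- ===== VERDICT (by name: the statement is the Claim_ definition above) =====
theorem escape2null_spec : Claim_equal_escape2null := by
  intro text _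
  unfold Spec_escape2null escape2null escape2null_alt
  rw [pvFoldl_machine, pvLoop_eq]
  simp
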